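-- pv_equiv track=rewrite | github.com/akeemjones/my-math-roots | scripts/fix_u6_visuals.py | extract_t_entries
-- ===== SOURCE A (Python) =====
-- def extract_t_entries(content):
--     """
--     Returns list of (val_start_pos, raw_escaped_str, decoded_str)
--     val_start_pos: index right after the opening quote of the t value
--     raw_escaped_str: the literal bytes between the quotes (with JS escapes)
--     decoded_str: Python string
--     """
--     results = []
--     needle = '"t":"'
--     i = 0
--     while True:
--         idx = content.find(needle, i)
--         if idx == -1:
--             break
--         val_start = idx + len(needle)
--         j = val_start
--         raw_chars = []
--         dec_chars = []
--         while j < len(content):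
--             ch = content[j]
--             if ch == '\\':
--                 nc = content[j + 1] if j + 1 < len(content) else ''
--                 raw_chars.append(ch)
--                 raw_chars.append(nc)
--                 if nc == '"':
--                     dec_chars.append('"')
--                 elif nc == 'n':
--                     dec_chars.append('\n')
--                 elif nc == 't':
--                     dec_chars.append('\t')
--                 elif nc == '\\':
--                     dec_chars.append('\\')
--                 else:
--                     dec_chars.append(nc)
--                 j += 2
--             elif ch == '"':
--                 break
--             else:
--                 raw_chars.append(ch)
--                 dec_chars.append(ch)
--                 j += 1
--         results.append((val_start, ''.join(raw_chars), ''.join(dec_chars)))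
--         i = idx + 1
--     return results
-- ===== SOURCE B (Python) =====
-- def extract_t_entries(content):
--     """Same contract as A: list of (val_start, raw, decoded) per '"t":"' hit.
--
--     Different decomposition: first collect ALL occurrence indices of the needle
--     in one comprehension (A's find/advance loop visits exactly every occurrence
--     in order), then map each occurrence to its entry: locate the value end,
--     slice the raw substring, and decode that slice in a separate pass."""
--     needle = '"t":"'
--     occs = [k for k in range(len(content)) if content.startswith(needle, k)]
--     results = []
--     for idx in occs:
--         val_start = idx + len(needle)
--         j = val_start
--         n = len(content)
--         while j < n:
--             ch = content[j]
--             if ch == '\\':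
--                 j += 2
--             elif ch == '"':
--                 break
--             else:
--                 j += 1
--         raw = content[val_start:j]
--         decoded = []
--         k = 0
--         while k < len(raw):
--             ch = raw[k]
--             if ch == '\\':
--                 nc = raw[k + 1] if k + 1 < len(raw) else ''
--                 decoded.append({'"': '"', 'n': '\n', 't': '\t', '\\': '\\'}.get(nc, nc))
--                 k += 2
--             else:
--                 decoded.append(ch)
--                 k += 1
--         results.append((val_start, raw, ''.join(decoded)))
--     return results
-- ===== Notes on version B (the rewrite author's own statement) =====
-- stated objective: alternative
-- what changed: A interleaves searching and decoding in one while-True find/advance loop that builds raw and decoded together; B first collects the list of all needle occurrence indices with a comprehension, then maps each occurrence to its entry by scanning only for the value end, slicing the raw substring, and decoding that slice in a separate pass.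
import Mathlib
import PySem

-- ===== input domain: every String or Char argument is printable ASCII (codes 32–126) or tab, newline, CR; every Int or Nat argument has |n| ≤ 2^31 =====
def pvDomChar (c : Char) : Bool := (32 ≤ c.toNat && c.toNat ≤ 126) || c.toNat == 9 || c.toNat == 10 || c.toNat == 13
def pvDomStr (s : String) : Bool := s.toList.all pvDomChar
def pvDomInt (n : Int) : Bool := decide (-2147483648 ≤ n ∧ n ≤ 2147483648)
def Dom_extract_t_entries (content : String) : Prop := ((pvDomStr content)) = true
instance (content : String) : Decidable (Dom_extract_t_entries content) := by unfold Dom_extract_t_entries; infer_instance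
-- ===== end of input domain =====

-- B replaces A's find/advance outer loop with an up-front list of all needle occurrences,
-- then maps each occurrence to its entry (end scan, raw slice, separate decode pass);
-- objective: alternative decomposition, same cost.

-- ===== PORT A =====
-- port of the builtin content.find(needle, k): first index ≥ k where nd is a prefix
def pvFindFromAux (hay nd : List Char) (k : Nat) : Nat → Option Nat
  | 0 => none
  | fuel + 1 => if nd.isPrefixOf (hay.drop k) then some k else pvFindFromAux hay nd (k + 1) fuel

def pvFindFrom (hay nd : List Char) (k : Nat) : Option Nat :=
  pvFindFromAux hay nd k (hay.length + 1 - k)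

-- A's inner while loop: builds raw and decoded together, in one fused pass
def pvAInner (l : List Char) : List Char × List Char :=
  match l with
  | [] => ([], [])
  | c :: rest =>
    if c = '\\' then
      match rest with
      | nc :: rest2 =>
        let p := pvAInner rest2
        ('\\' :: nc :: p.1,
         (if nc = '"' then '"' else if nc = 'n' then '\n' else if nc = 't' then '\t'
          else if nc = '\\' then '\\' else nc) :: p.2)
      | [] => (['\\'], [])   -- nc = '' : raw gets the lone backslash, decoded gets nothing
    else if c = '"' then ([], [])
    else
      let p := pvAInner rest
      (c :: p.1, c :: p.2)

-- A's outer while True loop (fuel bounds the strictly increasing search start i)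
def pvAOuter (content : List Char) (i : Nat) (fuel : Nat) : List (Int × String × String) :=
  match fuel with
  | 0 => []
  | fuel + 1 =>
    match pvFindFrom content ['"', 't', '"', ':', '"'] i with
    | none => []
    | some idx =>
      let valStart := idx + 5
      let p := pvAInner (content.drop valStart)
      ((valStart : Int), String.ofList p.1, String.ofList p.2) :: pvAOuter content (idx + 1) fuel

def extract_t_entries (content : String) : List (Int × String × String) :=
  pvAOuter content.toList 0 (content.toList.length + 1)

-- ===== PORT B =====
-- B value-end scan: length of the raw value (a backslash consumes the next char)
def pvBEnd (l : List Char) : Nat :=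
  match l with
  | [] => 0
  | c :: rest =>
    if c = '\\' then
      match rest with
      | _ :: rest2 => 2 + pvBEnd rest2
      | [] => 1      -- j += 2 overshoots the end; the slice clamps to the lone backslash
    else if c = '"' then 0
    else 1 + pvBEnd rest

-- B decode pass over the raw slice
def pvBDecode (raw : List Char) : List Char :=
  match raw with
  | [] => []
  | c :: rest =>
    if c = '\\' then
      match rest with
      | nc :: rest2 =>
        (if nc = '"' then '"' else if nc = 'n' then '\n' else if nc = 't' then '\t'
         else if nc = '\\' then '\\' else nc) :: pvBDecode rest2
      | [] => []     -- nc = '' decodes to nothing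
    else c :: pvBDecode rest

-- B per-occurrence entry: slice the raw value at idx + 5, then decode it
def pvBHit (content : List Char) (idx : Nat) : Int × String × String :=
  let s := content.drop (idx + 5)
  let raw := s.take (pvBEnd s)
  ((idx + 5 : Int), String.ofList raw, String.ofList (pvBDecode raw))

-- B: the comprehension of all occurrence indices, then a map over them
def extract_t_entries_alt (content : String) : List (Int × String × String) :=
  ((List.range content.toList.length).filter
      (fun k => List.isPrefixOf ['"', 't', '"', ':', '"'] (content.toList.drop k))).map
    (pvBHit content.toList)

-- ===== PRECONDITION & SPEC =====
def Spec_extract_t_entries (content : String) (out : List (Int × String × String)) : Prop := out = extract_t_entries_alt content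
instance (content : String) (out : List (Int × String × String)) : Decidable (Spec_extract_t_entries content out) := by unfold Spec_extract_t_entries; infer_instance

-- ===== CLAIM =====
def Claim_equal_extract_t_entries : Prop := ∀ (content : String), Dom_extract_t_entries content → Spec_extract_t_entries content (extract_t_entries content)

-- ===== LEMMAS AND PROOFS =====
theorem pvAInner_fst (l : List Char) : (pvAInner l).1 = l.take (pvBEnd l) := by
  induction l using pvAInner.induct with
  | case1 => simp [pvAInner, pvBEnd]
  | case2 nc rest2 ih => simp [pvAInner, pvBEnd, ih, Nat.add_comm]
  | case3 => decide
  | case4 rest h => rw [pvAInner.eq_def, pvBEnd.eq_def]; simp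
  | case5 c rest h h2 ih => rw [pvAInner.eq_def, pvBEnd.eq_def]; simp [h, h2, ih, Nat.add_comm]

theorem pvAInner_snd (l : List Char) : (pvAInner l).2 = pvBDecode ((pvAInner l).1) := by
  induction l using pvAInner.induct with
  | case1 => simp [pvAInner, pvBDecode]
  | case2 nc rest2 ih => simp [pvAInner, pvBDecode, ih]
  | case3 => decide
  | case4 rest h => rw [pvAInner.eq_def]; simp [pvBDecode]
  | case5 c rest h h2 ih =>
    rw [pvAInner.eq_def]; simp [h, h2, ih]
    conv_rhs => rw [pvBDecode.eq_def]
    simp [h]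

-- find = head of the filtered index window
theorem pvFindFromAux_eq (hay nd : List Char) (f : Nat) : ∀ k,
    pvFindFromAux hay nd k f
      = (List.filter (fun m => nd.isPrefixOf (hay.drop m)) (List.range' k f)).head? := by
  induction f with
  | zero => intro k; simp [pvFindFromAux]
  | succ f ih =>
    intro k
    rw [List.range'_succ]
    by_cases h : nd.isPrefixOf (hay.drop k)
    · simp [pvFindFromAux, h]
    · simp [pvFindFromAux, h, ih]

-- peeling the head occurrence off the filtered window
theorem pvFilter_head_cons (hay nd : List Char) (f : Nat) : ∀ k idx,
    (List.filter (fun m => nd.isPrefixOf (hay.drop m)) (List.range' k f)).head? = some idx →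
    List.filter (fun m => nd.isPrefixOf (hay.drop m)) (List.range' k f)
      = idx :: List.filter (fun m => nd.isPrefixOf (hay.drop m)) (List.range' (idx + 1) (k + f - (idx + 1))) := by
  induction f with
  | zero => intro k idx h; simp at h
  | succ f ih =>
    intro k idx h
    rw [List.range'_succ, List.filter_cons] at h ⊢
    cases hp : nd.isPrefixOf (hay.drop k) with
    | true =>
      simp only [hp, if_true, List.head?_cons, Option.some.injEq] at h ⊢
      subst h
      have harith : k + (f + 1) - (k + 1) = f := by omega
      rw [harith]
    | false =>
      simp only [hp, Bool.false_eq_true, if_false] at h ⊢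
      have harith : k + (f + 1) - (idx + 1) = k + 1 + f - (idx + 1) := by omega
      rw [ih (k + 1) idx h, harith]

theorem pvFilter_head_mem (hay nd : List Char) (f k idx : Nat)
    (h : (List.filter (fun m => nd.isPrefixOf (hay.drop m)) (List.range' k f)).head? = some idx) :
    k ≤ idx ∧ idx < k + f := by
  have hm : idx ∈ List.filter (fun m => nd.isPrefixOf (hay.drop m)) (List.range' k f) := by
    rw [pvFilter_head_cons hay nd f k idx h]
    exact List.mem_cons_self
  have := (List.mem_filter.mp hm).1
  rw [List.mem_range'_1] at this
  omega

-- A's outer loop equals a map over the remaining occurrence window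
theorem pvAOuter_eq_map (hay : List Char) : ∀ fuel i, hay.length + 1 - i ≤ fuel →
    pvAOuter hay i fuel
      = (List.filter (fun m => List.isPrefixOf ['"', 't', '"', ':', '"'] (hay.drop m))
          (List.range' i (hay.length + 1 - i))).map
        (fun idx =>
          let p := pvAInner (hay.drop (idx + 5))
          ((idx + 5 : Int), String.ofList p.1, String.ofList p.2)) := by
  intro fuel
  induction fuel with
  | zero =>
    intro i hb
    have : hay.length + 1 - i = 0 := by omega
    simp [pvAOuter, this]
  | succ fuel ih =>
    intro i hb
    rw [pvAOuter]
    rw [show pvFindFrom hay ['"', 't', '"', ':', '"'] i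
          = (List.filter (fun m => List.isPrefixOf ['"', 't', '"', ':', '"'] (hay.drop m))
              (List.range' i (hay.length + 1 - i))).head? from
        pvFindFromAux_eq hay _ _ i]
    cases hfind : (List.filter (fun m => List.isPrefixOf ['"', 't', '"', ':', '"'] (hay.drop m))
        (List.range' i (hay.length + 1 - i))).head? with
    | none =>
      rw [List.head?_eq_none_iff] at hfind
      simp [hfind]
    | some idx =>
      have hmem := pvFilter_head_mem hay _ _ _ _ hfind
      rw [pvFilter_head_cons hay _ _ _ _ hfind]
      rw [List.map_cons]
      have harith : i + (hay.length + 1 - i) - (idx + 1) = hay.length + 1 - (idx + 1) := by omega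
      rw [harith]
      rw [← ih (idx + 1) (by omega)]
      rfl

-- the needle never matches at index length (drop length = []), so the window can shrink by one
theorem pvFilter_last (hay : List Char) :
    List.filter (fun m => List.isPrefixOf ['"', 't', '"', ':', '"'] (hay.drop m))
        (List.range' 0 (hay.length + 1))
      = List.filter (fun m => List.isPrefixOf ['"', 't', '"', ':', '"'] (hay.drop m))
        (List.range hay.length) := by
  rw [List.range'_1_concat, List.filter_append]
  simp [List.drop_length, List.range_eq_range']

-- ===== VERDICT =====
theorem extract_t_entries_spec : Claim_equal_extract_t_entries := by
  intro content _
  show extract_t_entries content = extract_t_entries_alt content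
  unfold extract_t_entries extract_t_entries_alt
  rw [pvAOuter_eq_map content.toList (content.toList.length + 1) 0 (by omega)]
  rw [Nat.sub_zero, pvFilter_last]
  apply List.map_congr_left
  intro idx _
  simp only [pvBHit, pvAInner_fst, pvAInner_snd, pvAInner_fst]
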